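-- pv_equiv track=rewrite | github.com/xuiltul/animaworks | core/_agent_priming.py | _extract_message_from_prompt
-- ===== SOURCE A (Python) =====
-- def _extract_message_from_prompt(prompt: str) -> str:
--     """Extract the latest message content from a chat prompt.
--
--     The prompt from ConversationMemory.build_chat_prompt() has format:
--     - If no history: just the message content
--     - If history: conversation history + separator + latest message
--
--     We want to extract just the latest message for keyword extraction.
--     """
--     # Look for the pattern "**[HH:MM] from_person:**" which marks conversation history
--     # The actual message is typically after the last history entry
--     lines = prompt.strip().splitlines()
--
--     # If there's no history marker, the whole prompt is the message
--     if not any("**[" in line and "]" in line and ":**" in line for line in lines):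
--         return prompt
--
--     # Find the last content block after history
--     # Heuristic: take last paragraph that doesn't look like a history entry
--     content_lines = []
--     for line in reversed(lines):
--         if line.startswith("**[") and "]" in line and ":**" in line:
--             # Hit a history entry, stop
--             break
--         if line.strip():
--             content_lines.insert(0, line)
--
--     return "\n".join(content_lines) if content_lines else prompt
-- ===== SOURCE B (Python) =====
-- def _extract_message_from_prompt(prompt: str) -> str:
--     lines = prompt.strip().splitlines()
--
--     if not any("**[" in line and "]" in line and ":**" in line for line in lines):
--         return prompt
--
--     # index of the last history-entry line, -1 if none
--     idx = -1
--     for j, line in enumerate(lines):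
--         if line.startswith("**[") and "]" in line and ":**" in line:
--             idx = j
--
--     content_lines = [line for line in lines[idx + 1:] if line.strip()]
--     return "\n".join(content_lines) if content_lines else prompt
-- ===== Notes on version B (the rewrite author's own statement) =====
-- stated objective: simpler
-- what changed: Replaces the reverse scan with break and insert(0,...) prepending by a forward scan that records the index of the last history-entry line, then a single filtered slice lines[idx+1:].
import Mathlib
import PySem

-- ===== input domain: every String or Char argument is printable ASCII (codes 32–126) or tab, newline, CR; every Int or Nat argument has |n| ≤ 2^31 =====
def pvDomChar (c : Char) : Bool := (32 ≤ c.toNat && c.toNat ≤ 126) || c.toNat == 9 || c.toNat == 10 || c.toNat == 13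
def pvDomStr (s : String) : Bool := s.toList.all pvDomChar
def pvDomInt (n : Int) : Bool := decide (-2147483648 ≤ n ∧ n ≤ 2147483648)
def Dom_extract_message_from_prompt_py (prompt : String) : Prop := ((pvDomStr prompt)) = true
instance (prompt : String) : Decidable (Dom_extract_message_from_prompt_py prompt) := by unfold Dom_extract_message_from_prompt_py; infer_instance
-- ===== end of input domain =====

-- B replaces A's reverse scan with break-and-prepend by computing the index of the
-- last history-entry line and taking a forward filtered slice (objective: simpler).

-- ===== PORT A =====
-- reverse loop: 'for line in reversed(lines): if <boundary>: break; if line.strip(): content_lines.insert(0, line)'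
def pvLoopA : List String → List String → List String
  | [], acc => acc
  | l :: rest, acc =>
      if PySem.Str.startswith l "**[" && PySem.Str.isIn "]" l && PySem.Str.isIn ":**" l then
        acc
      else
        pvLoopA rest (if (PySem.Str.strip l).toList.isEmpty then acc else l :: acc)

def extract_message_from_prompt_py (prompt : String) : String :=
  let lines := PySem.Str.splitlines (PySem.Str.strip prompt)
  if !(lines.any (fun line => PySem.Str.isIn "**[" line && PySem.Str.isIn "]" line && PySem.Str.isIn ":**" line)) then
    prompt
  else
    let content_lines := pvLoopA lines.reverse []
    if content_lines.isEmpty then prompt else PySem.Str.join "\n" content_lines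

-- ===== PORT B =====
def extract_message_from_prompt_py_alt (prompt : String) : String :=
  let lines := PySem.Str.splitlines (PySem.Str.strip prompt)
  if !(lines.any (fun line => PySem.Str.isIn "**[" line && PySem.Str.isIn "]" line && PySem.Str.isIn ":**" line)) then
    prompt
  else
    let idx : Int := (PySem.List.enumerate lines 0).foldl
      (fun a p => if PySem.Str.startswith p.2 "**[" && PySem.Str.isIn "]" p.2 && PySem.Str.isIn ":**" p.2 then p.1 else a)
      (-1)
    let content_lines := (PySem.List.slice lines (some (idx + 1)) none).filter
      (fun line => !(PySem.Str.strip line).toList.isEmpty)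
    if content_lines.isEmpty then prompt else PySem.Str.join "\n" content_lines

-- ===== PRECONDITION & SPEC =====
def Spec_extract_message_from_prompt_py (prompt : String) (out : String) : Prop := out = extract_message_from_prompt_py_alt prompt
instance (prompt : String) (out : String) : Decidable (Spec_extract_message_from_prompt_py prompt out) := by unfold Spec_extract_message_from_prompt_py; infer_instance

-- ===== CLAIM (what is proved, stated in full; the proofs are below) =====
def Claim_equal_extract_message_from_prompt_py : Prop := ∀ (prompt : String), Dom_extract_message_from_prompt_py prompt → Spec_extract_message_from_prompt_py prompt (extract_message_from_prompt_py prompt)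

-- ===== LEMMAS AND PROOFS =====

-- the boundary test of the loops
def pvB (l : String) : Bool :=
  PySem.Str.startswith l "**[" && PySem.Str.isIn "]" l && PySem.Str.isIn ":**" l

def pvKeep (l : String) : Bool := !(PySem.Str.strip l).toList.isEmpty

-- position of the last boundary line, from the front
def pvLast : List String → Option Nat
  | [] => none
  | l :: rest =>
      match pvLast rest with
      | some k => some (k + 1)
      | none => if pvB l then some 0 else none

lemma pvLast_lt : ∀ (ls : List String) (k : Nat), pvLast ls = some k → k < ls.length := by
  intro ls
  induction ls with
  | nil => intro k h; simp [pvLast] at h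
  | cons l rest ih =>
      intro k h
      simp only [pvLast] at h
      cases hr : pvLast rest with
      | some j =>
          rw [hr] at h
          injection h with h
          have := ih j hr
          simp only [List.length_cons]
          omega
      | none =>
          rw [hr] at h
          by_cases hb : pvB l
          · simp [hb] at h; simp [← h]
          · simp [hb] at h

lemma pvLast_append (xs : List String) (l : String) :
    pvLast (xs ++ [l]) = if pvB l then some xs.length else pvLast xs := by
  induction xs with
  | nil => by_cases hb : pvB l <;> simp [pvLast, hb]
  | cons x xs ih =>
      simp only [List.cons_append, pvLast, ih]
      by_cases hb : pvB l
      · simp [hb]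
      · simp [hb]

lemma pvFold_enum (ls : List String) : ∀ (s a : Int),
    (PySem.List.enumerate ls s).foldl (fun a p => if pvB p.2 then p.1 else a) a
      = match pvLast ls with
        | some k => s + (k : Int)
        | none => a := by
  induction ls with
  | nil => intro s a; simp [PySem.List.enumerate_nil, pvLast]
  | cons l rest ih =>
      intro s a
      rw [PySem.List.enumerate_cons]
      simp only [List.foldl_cons, ih]
      cases hr : pvLast rest with
      | some k => simp only [pvLast, hr]; push_cast; ring_nf
      | none =>
          simp only [pvLast, hr]
          by_cases hb : pvB l <;> simp [hb]

lemma pvLoopA_eq (rs : List String) : ∀ (acc : List String),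
    pvLoopA rs acc
      = (rs.reverse.drop (match pvLast rs.reverse with | some k => k + 1 | none => 0)).filter pvKeep ++ acc := by
  induction rs with
  | nil => intro acc; simp [pvLoopA, pvLast]
  | cons l rs ih =>
      intro acc
      have hrev : (l :: rs).reverse = rs.reverse ++ [l] := by simp
      rw [hrev, pvLast_append]
      by_cases hb : pvB l
      · have hstop : pvLoopA (l :: rs) acc = acc := by
          simp only [pvLoopA]
          rw [show (PySem.Str.startswith l "**[" && PySem.Str.isIn "]" l && PySem.Str.isIn ":**" l) = pvB l from rfl]
          simp [hb]
        rw [hstop, if_pos hb]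
        simp [List.drop_of_length_le]
      · have hstep : pvLoopA (l :: rs) acc
            = pvLoopA rs (if (PySem.Str.strip l).toList.isEmpty then acc else l :: acc) := by
          simp only [pvLoopA]
          rw [show (PySem.Str.startswith l "**[" && PySem.Str.isIn "]" l && PySem.Str.isIn ":**" l) = pvB l from rfl]
          simp [hb]
        rw [hstep, ih, if_neg hb]
        have hle : (match pvLast rs.reverse with | some k => k + 1 | none => 0) ≤ rs.reverse.length := by
          cases hr : pvLast rs.reverse with
          | some k => have := pvLast_lt _ _ hr; simpa using this
          | none => simp
        rw [List.drop_append_of_le_length hle, List.filter_append]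
        cases hk : (PySem.Str.strip l).toList.isEmpty with
        | true =>
            have hkeep : pvKeep l = false := by unfold pvKeep; rw [hk]; rfl
            simp [List.filter, hkeep]
        | false =>
            have hkeep : pvKeep l = true := by unfold pvKeep; rw [hk]; rfl
            simp [List.filter, hkeep]

-- ===== VERDICT (by name: the statement is the Claim_ definition above) =====
theorem extract_message_from_prompt_py_spec : Claim_equal_extract_message_from_prompt_py := by
  intro prompt _
  unfold Spec_extract_message_from_prompt_py
  unfold extract_message_from_prompt_py extract_message_from_prompt_py_alt
  set lines := PySem.Str.splitlines (PySem.Str.strip prompt) with hlines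
  cases hg : lines.any (fun line => PySem.Str.isIn "**[" line && PySem.Str.isIn "]" line && PySem.Str.isIn ":**" line) with
  | false => simp only [hg, Bool.not_false, if_true]
  | true =>
    simp only [hg, Bool.not_true]
    have hfold : (PySem.List.enumerate lines 0).foldl
        (fun a p => if PySem.Str.startswith p.2 "**[" && PySem.Str.isIn "]" p.2 && PySem.Str.isIn ":**" p.2 then p.1 else a) (-1)
        = match pvLast lines with | some k => (k : Int) | none => -1 := by
      rw [show (fun (a : Int) (p : Int × String) => if PySem.Str.startswith p.2 "**[" && PySem.Str.isIn "]" p.2 && PySem.Str.isIn ":**" p.2 then p.1 else a)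
            = (fun (a : Int) (p : Int × String) => if pvB p.2 then p.1 else a) from rfl]
      rw [pvFold_enum]
      cases pvLast lines <;> simp
    rw [hfold]
    have hslice : PySem.List.slice lines (some ((match pvLast lines with | some k => (k : Int) | none => -1) + 1)) none
        = lines.drop (match pvLast lines with | some k => k + 1 | none => 0) := by
      cases h : pvLast lines with
      | some k =>
          have : ((k : Int) + 1) = ((k + 1 : Nat) : Int) := by push_cast; ring
          rw [this, PySem.List.slice_from_natCast]
      | none =>
          have : ((-1 : Int) + 1) = ((0 : Nat) : Int) := by norm_num
          rw [this, PySem.List.slice_from_natCast]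
    rw [hslice]
    have hloop := pvLoopA_eq lines.reverse []
    rw [List.reverse_reverse] at hloop
    rw [hloop, List.append_nil,
      show pvKeep = (fun line => !(PySem.Str.strip line).toList.isEmpty) from rfl]
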